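-- pv_equiv track=rewrite | github.com/lfraundorfer/leadscraper | crm_templates.py | _format_contact_for_direct_use
-- ===== SOURCE A (Python) =====
-- _HONORIFICS = {"herr", "frau"}
--
-- _NAME_TITLES = {
--     "ing", "ing.", "dipl", "dipl.", "dipl.-ing", "dipl.-ing.", "di", "dr", "dr.",
--     "mag", "mag.", "prof", "prof.", "fh", "(fh)", "mba", "msc", "bsc",
-- }
--
-- def _clean_name_token(token: str) -> str:
--     return token.strip().strip(",;:")
--
-- def _is_name_title(token: str) -> bool:
--     base = _clean_name_token(token).lower().strip("().")
--     return base in {t.strip("().") for t in _NAME_TITLES}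
--
-- def _format_contact_for_direct_use(contact_name: str) -> tuple[str, str]:
--     """
--     Returns (subject/contact label, salutation).
--     Examples:
--       "Herr Bodziany Mateusz" -> ("Herr Bodziany", "Guten Tag Herr Bodziany,")
--       "Frau Ing. Hallwirth Elisabeth" -> ("Frau Hallwirth", "Guten Tag Frau Hallwirth,")
--       "Christian Trilsam" -> ("Christian", "Guten Tag Christian,")
--     """
--     raw = (contact_name or "").strip()
--     if not raw:
--         return "", "Sehr geehrte Damen und Herren,"
--
--     tokens = [_clean_name_token(t) for t in raw.split() if _clean_name_token(t)]
--     if not tokens: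
--         return "", "Sehr geehrte Damen und Herren,"
--
--     for i, token in enumerate(tokens):
--         if token.lower() in _HONORIFICS:
--             j = i + 1
--             while j < len(tokens) and _is_name_title(tokens[j]):
--                 j += 1
--             if j < len(tokens):
--                 label = f"{token} {tokens[j]}"
--             else:
--                 label = token
--             return label, f"Guten Tag {label},"
--
--     for token in tokens:
--         if not _is_name_title(token):
--             return token, f"Guten Tag {token},"
--
--     fallback = tokens[0]
--     return fallback, f"Guten Tag {fallback},"
-- ===== SOURCE B (Python) =====
-- _HONORIFICS = {"herr", "frau"}
--
-- _NAME_TITLES = {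
--     "ing", "ing.", "dipl", "dipl.", "dipl.-ing", "dipl.-ing.", "di", "dr", "dr.",
--     "mag", "mag.", "prof", "prof.", "fh", "(fh)", "mba", "msc", "bsc",
-- }
--
-- def _clean_name_token(token: str) -> str:
--     return token.strip().strip(",;:")
--
-- def _is_name_title(token: str) -> bool:
--     base = _clean_name_token(token).lower().strip("().")
--     return base in {t.strip("().") for t in _NAME_TITLES}
--
-- def _format_contact_for_direct_use(contact_name: str) -> tuple[str, str]:
--     raw = (contact_name or "").strip()
--     if not raw:
--         return "", "Sehr geehrte Damen und Herren,"
--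
--     tokens = [c for c in (_clean_name_token(t) for t in raw.split()) if c]
--     if not tokens:
--         return "", "Sehr geehrte Damen und Herren,"
--
--     # Drop the academic titles once; honorifics survive since they are not titles.
--     cleaned = [t for t in tokens if not _is_name_title(t)]
--
--     k = next((i for i, t in enumerate(cleaned) if t.lower() in _HONORIFICS), None)
--     if k is not None:
--         label = f"{cleaned[k]} {cleaned[k + 1]}" if k + 1 < len(cleaned) else cleaned[k]
--     else:
--         label = cleaned[0] if cleaned else tokens[0]
--     return label, f"Guten Tag {label},"
-- ===== Notes on version B (the rewrite author's own statement) =====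
-- stated objective: simpler
-- what changed: A scans for an honorific with a nested title-skipping while-loop and then runs a second fallback scan over the tokens; B filters the academic titles out once and does a single scan of the filtered list, where the name is simply the next element after the honorific and the fallback is the head of the filtered list.
import Mathlib
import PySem

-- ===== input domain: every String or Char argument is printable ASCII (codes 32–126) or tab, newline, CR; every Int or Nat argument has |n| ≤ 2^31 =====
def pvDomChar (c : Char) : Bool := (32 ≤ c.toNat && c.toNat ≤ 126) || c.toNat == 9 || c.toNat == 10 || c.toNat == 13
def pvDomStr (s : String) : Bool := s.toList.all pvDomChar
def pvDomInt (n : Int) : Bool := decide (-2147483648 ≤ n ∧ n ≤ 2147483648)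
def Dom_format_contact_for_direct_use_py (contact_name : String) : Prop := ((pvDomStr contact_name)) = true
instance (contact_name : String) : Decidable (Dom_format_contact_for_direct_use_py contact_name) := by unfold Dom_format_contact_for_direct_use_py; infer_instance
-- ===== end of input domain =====

-- B replaces A's honorific scan with its nested title-skipping while-loop plus a second
-- fallback scan by ONE title-filter pass followed by a single scan of the filtered list
-- (objective: simpler). Return values are proved equal on all inputs.

-- ===== PORT A =====
-- shared module helpers (used verbatim by both Pythons)

-- _HONORIFICS = {"herr", "frau"}  (set; only membership is used, ported as list membership)
def pvHonorifics : List String := ["herr", "frau"]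

-- _NAME_TITLES (set literal; only membership is used, ported as list membership)
def pvNameTitles : List String :=
  ["ing", "ing.", "dipl", "dipl.", "dipl.-ing", "dipl.-ing.", "di", "dr", "dr.",
   "mag", "mag.", "prof", "prof.", "fh", "(fh)", "mba", "msc", "bsc"]

-- _clean_name_token: token.strip().strip(",;:")
def cleanNameToken (t : String) : String :=
  PySem.Str.stripChars (PySem.Str.strip t) ",;:"

-- _is_name_title: base in {t.strip("().") for t in _NAME_TITLES}
def isNameTitle (t : String) : Bool :=
  let base := PySem.Str.stripChars (PySem.Str.lower (cleanNameToken t)) "()."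
  (pvNameTitles.map (fun s => PySem.Str.stripChars s "().")).contains base

-- token.lower() in _HONORIFICS
def isHonorific (t : String) : Bool := pvHonorifics.contains (PySem.Str.lower t)

-- A's inner 'while j < len(tokens) and _is_name_title(tokens[j]): j += 1' followed by the
-- 'j < len(tokens)' test: first non-title element of the suffix, if any
def aSkipTitles : List String → Option String
  | [] => none
  | t :: rest => if isNameTitle t then aSkipTitles rest else some t

-- A's first for-loop: return the label at the first honorific
def aHonLoop : List String → Option String
  | [] => none
  | t :: rest =>
    if isHonorific t then
      some (match aSkipTitles rest with
            | some n => t ++ " " ++ n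
            | none => t)
    else aHonLoop rest

-- A's second for-loop: first token that is not a title
def aSecondLoop : List String → Option String
  | [] => none
  | t :: rest => if isNameTitle t then aSecondLoop rest else some t

def format_contact_for_direct_use_py (contact_name : String) : String × String :=
  let raw := PySem.Str.strip contact_name   -- (contact_name or "").strip()
  if raw = "" then ("", "Sehr geehrte Damen und Herren,")
  else
    -- [_clean_name_token(t) for t in raw.split() if _clean_name_token(t)]
    let tokens := (PySem.Str.split₀ raw).filterMap
      (fun t => if cleanNameToken t = "" then none else some (cleanNameToken t))
    if tokens = [] then ("", "Sehr geehrte Damen und Herren,")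
    else
      match aHonLoop tokens with
      | some label => (label, "Guten Tag " ++ label ++ ",")
      | none =>
        match aSecondLoop tokens with
        | some t => (t, "Guten Tag " ++ t ++ ",")
        | none =>
          let fallback := tokens.headI   -- tokens[0] (tokens ≠ [] here)
          (fallback, "Guten Tag " ++ fallback ++ ",")

-- ===== PORT B =====
-- B's single scan of cleaned: at the first honorific, pair it with the next element
-- (cleaned[k+1] = head of the remainder) if there is one
def bFind : List String → Option String
  | [] => none
  | t :: rest =>
    if isHonorific t then
      some (match rest.head? with
            | some n => t ++ " " ++ n
            | none => t)
    else bFind rest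

def format_contact_for_direct_use_py_alt (contact_name : String) : String × String :=
  let raw := PySem.Str.strip contact_name
  if raw = "" then ("", "Sehr geehrte Damen und Herren,")
  else
    -- [c for c in (_clean_name_token(t) for t in raw.split()) if c]
    let tokens := ((PySem.Str.split₀ raw).map cleanNameToken).filter (fun c => c ≠ "")
    if tokens = [] then ("", "Sehr geehrte Damen und Herren,")
    else
      let cleaned := tokens.filter (fun t => !isNameTitle t)
      let label :=
        match bFind cleaned with
        | some l => l
        | none =>
          match cleaned.head? with
          | some t => t
          | none => tokens.headI
      (label, "Guten Tag " ++ label ++ ",")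

-- ===== PRECONDITION & SPEC =====
def Spec_format_contact_for_direct_use_py (contact_name : String) (out : String × String) : Prop := out = format_contact_for_direct_use_py_alt contact_name
instance (contact_name : String) (out : String × String) : Decidable (Spec_format_contact_for_direct_use_py contact_name out) := by unfold Spec_format_contact_for_direct_use_py; infer_instance

-- ===== CLAIM (what is proved, stated in full; the proofs are below) =====
def Claim_equal_format_contact_for_direct_use_py : Prop := ∀ (contact_name : String), Dom_format_contact_for_direct_use_py contact_name → Spec_format_contact_for_direct_use_py contact_name (format_contact_for_direct_use_py contact_name)

-- ===== LEMMAS AND PROOFS =====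

-- per-char facts about ASCII lowering
theorem lowerChar_toNat (c : Char) (h : PySem.Chars.isupper c = true) :
    (PySem.Chars.lowerChar c).toNat = c.toNat + 32 ∧ 65 ≤ c.toNat ∧ c.toNat ≤ 90 := by
  unfold PySem.Chars.isupper at h
  simp only [Bool.and_eq_true, decide_eq_true_eq, Char.le_def] at h
  have h1 : 65 ≤ c.toNat := h.1
  have h2 : c.toNat ≤ 90 := h.2
  refine ⟨?_, h1, h2⟩
  unfold PySem.Chars.lowerChar
  rw [if_pos (by unfold PySem.Chars.isupper; simp only [Bool.and_eq_true, decide_eq_true_eq, Char.le_def]; exact h)]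
  rw [Char.toNat_ofNat, if_pos (Or.inl (by omega))]

-- per-char: lowering a char never changes whether it is whitespace
theorem isspace_lowerChar (c : Char) :
    PySem.Chars.isspace (PySem.Chars.lowerChar c) = PySem.Chars.isspace c := by
  by_cases h : PySem.Chars.isupper c = true
  · obtain ⟨hv, h1, h2⟩ := lowerChar_toNat c h
    have L : PySem.Chars.isspace (PySem.Chars.lowerChar c) = false := by
      unfold PySem.Chars.isspace
      simp only [hv, Bool.or_eq_false_iff, Bool.and_eq_false_iff, decide_eq_false_iff_not]
      omega
    have R : PySem.Chars.isspace c = false := by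
      unfold PySem.Chars.isspace
      simp only [Bool.or_eq_false_iff, Bool.and_eq_false_iff, decide_eq_false_iff_not]
      omega
    rw [L, R]
  · unfold PySem.Chars.lowerChar
    rw [if_neg h]

-- per-char: lowering a char never changes membership in a strip-set of punctuation
theorem mem_punct_lowerChar (c : Char) (chs : List Char)
    (hch : ∀ d ∈ chs, d.toNat < 65 ∨ (90 < d.toNat ∧ d.toNat < 97) ∨ 122 < d.toNat) :
    chs.contains (PySem.Chars.lowerChar c) = chs.contains c := by
  by_cases h : PySem.Chars.isupper c = true
  · obtain ⟨hv, h1, h2⟩ := lowerChar_toNat c h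
    have L : chs.contains (PySem.Chars.lowerChar c) = false := by
      simp only [List.contains_eq_mem, decide_eq_false_iff_not]
      intro hm
      have := hch _ hm
      omega
    have R : chs.contains c = false := by
      simp only [List.contains_eq_mem, decide_eq_false_iff_not]
      intro hm
      have := hch _ hm
      omega
    rw [L, R]
  · unfold PySem.Chars.lowerChar
    rw [if_neg h]

theorem map_lc_dropWhile (p : Char → Bool) (hp : (p ∘ PySem.Chars.lowerChar) = p)
    (l : List Char) :
    List.map PySem.Chars.lowerChar (List.dropWhile p l)
      = List.dropWhile p (List.map PySem.Chars.lowerChar l) := by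
  rw [List.dropWhile_map, hp]

-- lower commutes with whitespace strip
theorem lower_strip (cs : List Char) :
    PySem.Chars.lower (PySem.Chars.strip cs) = PySem.Chars.strip (PySem.Chars.lower cs) := by
  have hf : (PySem.Chars.isspace ∘ PySem.Chars.lowerChar) = PySem.Chars.isspace :=
    funext isspace_lowerChar
  simp only [PySem.Chars.strip, PySem.Chars.rstrip, PySem.Chars.lstrip, PySem.Chars.lower]
  rw [List.map_reverse, map_lc_dropWhile _ hf, List.map_reverse, map_lc_dropWhile _ hf]

-- lower commutes with stripChars for punctuation strip-sets
theorem lower_stripChars (cs chs : List Char)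
    (hch : ∀ d ∈ chs, d.toNat < 65 ∨ (90 < d.toNat ∧ d.toNat < 97) ∨ 122 < d.toNat) :
    PySem.Chars.lower (PySem.Chars.stripChars cs chs)
      = PySem.Chars.stripChars (PySem.Chars.lower cs) chs := by
  have hf : ((fun c => chs.contains c) ∘ PySem.Chars.lowerChar) = (fun c => chs.contains c) :=
    funext (fun c => mem_punct_lowerChar c chs hch)
  simp only [PySem.Chars.stripChars, PySem.Chars.lower]
  rw [List.map_reverse, map_lc_dropWhile _ hf, List.map_reverse, map_lc_dropWhile _ hf]

-- an honorific token is never a name title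
theorem honorific_not_title (t : String) (h : isHonorific t = true) : isNameTitle t = false := by
  have ht : PySem.Str.lower t = "herr" ∨ PySem.Str.lower t = "frau" := by
    unfold isHonorific pvHonorifics at h
    simpa using h
  have hlt : PySem.Chars.lower t.toList = "herr".toList ∨
      PySem.Chars.lower t.toList = "frau".toList := by
    rcases ht with h' | h'
    · left; rw [← PySem.Str.toList_lower, h']
    · right; rw [← PySem.Str.toList_lower, h']
  have hbase : (PySem.Str.stripChars (PySem.Str.lower (cleanNameToken t)) "().").toList
      = PySem.Chars.stripChars
          (PySem.Chars.stripChars (PySem.Chars.strip (PySem.Chars.lower t.toList)) ",;:".toList)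
          "().".toList := by
    unfold cleanNameToken
    simp only [PySem.Str.toList_stripChars, PySem.Str.toList_lower, PySem.Str.toList_strip]
    rw [lower_stripChars _ _ (by
      intro d hd
      rw [show (",;:" : String).toList = [',',';',':'] from by decide] at hd
      fin_cases hd <;> simp), lower_strip]
  unfold isNameTitle
  simp only [List.contains_eq_mem, decide_eq_false_iff_not]
  intro hm
  rw [List.mem_map] at hm
  obtain ⟨a, ha, hfa⟩ := hm
  have hs := congrArg String.toList hfa
  rw [hbase] at hs
  rcases hlt with h' | h' <;> rw [h'] at hs <;> revert hs <;>
    simp only [pvNameTitles, List.mem_cons, List.not_mem_nil, or_false] at ha <;>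
    rcases ha with rfl|rfl|rfl|rfl|rfl|rfl|rfl|rfl|rfl|rfl|rfl|rfl|rfl|rfl|rfl|rfl|rfl|rfl <;>
    decide

-- A's title-skip = head of B's filtered remainder
theorem aSkipTitles_eq (ts : List String) :
    aSkipTitles ts = (ts.filter (fun t => !isNameTitle t)).head? := by
  induction ts with
  | nil => rfl
  | cons t rest ih =>
    by_cases h : isNameTitle t <;> simp [aSkipTitles, h, ih]

theorem aSecondLoop_eq (ts : List String) :
    aSecondLoop ts = (ts.filter (fun t => !isNameTitle t)).head? := by
  induction ts with
  | nil => rfl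
  | cons t rest ih =>
    by_cases h : isNameTitle t <;> simp [aSecondLoop, h, ih]

-- A's honorific loop = B's scan of the filtered list
theorem aHonLoop_eq (ts : List String) :
    aHonLoop ts = bFind (ts.filter (fun t => !isNameTitle t)) := by
  induction ts with
  | nil => rfl
  | cons t rest ih =>
    by_cases ht : isNameTitle t
    · have hh : isHonorific t = false := by
        by_contra h
        have := honorific_not_title t (by simpa using h)
        simp [this] at ht
      simp [aHonLoop, ht, hh, ih]
    · by_cases hh : isHonorific t
      · simp [aHonLoop, ht, hh, bFind, aSkipTitles_eq]
      · simp [aHonLoop, ht, hh, bFind, ih]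

theorem tokens_eq (xs : List String) :
    xs.filterMap (fun t => if cleanNameToken t = "" then none else some (cleanNameToken t))
      = (xs.map cleanNameToken).filter (fun c => c ≠ "") := by
  induction xs with
  | nil => rfl
  | cons x rest ih =>
    by_cases h : cleanNameToken x = "" <;>
      simp [h, ih]

-- ===== VERDICT (by name: the statement is the Claim_ definition above) =====
theorem format_contact_for_direct_use_py_spec : Claim_equal_format_contact_for_direct_use_py := by
  intro contact_name _
  unfold Spec_format_contact_for_direct_use_py
  unfold format_contact_for_direct_use_py format_contact_for_direct_use_py_alt
  simp only [tokens_eq]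
  set tokens := ((PySem.Str.split₀ (PySem.Str.strip contact_name)).map cleanNameToken).filter (fun c => c ≠ "") with htok
  by_cases hraw : PySem.Str.strip contact_name = ""
  · simp [hraw]
  · by_cases htoks : tokens = []
    · simp [hraw, htoks]
    · simp only [hraw, htoks, if_false]
      rw [aHonLoop_eq]
      cases hb : bFind (tokens.filter (fun t => !isNameTitle t)) with
      | some l => rfl
      | none =>
        rw [aSecondLoop_eq]
        cases hh : (tokens.filter (fun t => !isNameTitle t)).head? <;> rfl
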